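-- pv_equiv track=rewrite | github.com/TheNoiy11/2016-Python | Tut9.py | sumEvenOddZeroes
-- ===== SOURCE A (Python) =====
-- def sumEvenOddZeroes(list):
-- 	if len(list) == 0:
-- 		return (0,0,0)
--
-- 	if list[0] == 0:
-- 		sumEven, sumOdd, Zeroes = sumEvenOddZeroes(list[1:])
-- 		return sumEven, sumOdd, Zeroes + 1
-- 	elif list[0] % 2 == 0:
-- 		sumEven, sumOdd, Zeroes = sumEvenOddZeroes(list[1:])
-- 		return sumEven + list[0], sumOdd, Zeroes
-- 	elif list[0] % 2 != 0:
-- 		sumEven, sumOdd, Zeroes = sumEvenOddZeroes(list[1:])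
-- 		return sumEven, sumOdd + list[0], Zeroes
-- ===== SOURCE B (Python) =====
-- def sumEvenOddZeroes(list):
-- 	sumEven, sumOdd, Zeroes = 0, 0, 0
-- 	for x in list:
-- 		if x == 0:
-- 			Zeroes += 1
-- 		elif x % 2 == 0:
-- 			sumEven += x
-- 		else:
-- 			sumOdd += x
-- 	return (sumEven, sumOdd, Zeroes)
-- ===== Notes on version B (the rewrite author's own statement) =====
-- stated objective: simpler
-- what changed: Replaces A's head-recursion (which slices the list and rebuilds the tuple on the way back up) with a single iterative loop over three accumulators.
import Mathlib
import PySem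

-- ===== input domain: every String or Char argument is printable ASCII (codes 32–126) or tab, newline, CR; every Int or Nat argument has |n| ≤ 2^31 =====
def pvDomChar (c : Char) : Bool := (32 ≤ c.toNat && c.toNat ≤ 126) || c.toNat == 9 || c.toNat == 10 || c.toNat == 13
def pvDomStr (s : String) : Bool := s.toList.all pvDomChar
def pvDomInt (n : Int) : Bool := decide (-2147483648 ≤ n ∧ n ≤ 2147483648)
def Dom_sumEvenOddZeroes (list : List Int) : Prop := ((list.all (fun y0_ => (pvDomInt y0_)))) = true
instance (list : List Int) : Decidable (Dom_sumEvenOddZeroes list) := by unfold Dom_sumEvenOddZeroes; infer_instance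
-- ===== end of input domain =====

-- B replaces A's head-recursion over list[1:] slices with one iterative loop over three accumulators (simpler).

-- ===== PORT A =====
-- literal port of A's recursion: empty check, then branch on head, recurse on the tail (list[1:])
def sumEvenOddZeroes (list : List Int) : Int × Int × Int :=
  match list with
  | [] => (0, 0, 0)
  | x :: rest =>
    if x = 0 then
      let (sumEven, sumOdd, zeroes) := sumEvenOddZeroes rest
      (sumEven, sumOdd, zeroes + 1)
    else if PySem.Int.mod x 2 = 0 then
      let (sumEven, sumOdd, zeroes) := sumEvenOddZeroes rest
      (sumEven + x, sumOdd, zeroes)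
    else
      let (sumEven, sumOdd, zeroes) := sumEvenOddZeroes rest
      (sumEven, sumOdd + x, zeroes)

-- ===== PORT B =====
-- literal port of B: a foldl carrying (sumEven, sumOdd, Zeroes) through the loop
def sumEvenOddZeroes_alt (list : List Int) : Int × Int × Int :=
  list.foldl
    (fun acc x =>
      let (sumEven, sumOdd, zeroes) := acc
      if x = 0 then (sumEven, sumOdd, zeroes + 1)
      else if PySem.Int.mod x 2 = 0 then (sumEven + x, sumOdd, zeroes)
      else (sumEven, sumOdd + x, zeroes))
    (0, 0, 0)

-- ===== PRECONDITION & SPEC =====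
def Spec_sumEvenOddZeroes (list : List Int) (out : Int × Int × Int) : Prop := out = sumEvenOddZeroes_alt list
instance (list : List Int) (out : Int × Int × Int) : Decidable (Spec_sumEvenOddZeroes list out) := by unfold Spec_sumEvenOddZeroes; infer_instance

-- ===== CLAIM (what is proved, stated in full; the proofs are below) =====
def Claim_equal_sumEvenOddZeroes : Prop := ∀ (list : List Int), Dom_sumEvenOddZeroes list → Spec_sumEvenOddZeroes list (sumEvenOddZeroes list)

-- ===== LEMMAS AND PROOFS =====

-- the fold's step, named for the lemmas
def pvStep (acc : Int × Int × Int) (x : Int) : Int × Int × Int :=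
  let (sumEven, sumOdd, zeroes) := acc
  if x = 0 then (sumEven, sumOdd, zeroes + 1)
  else if PySem.Int.mod x 2 = 0 then (sumEven + x, sumOdd, zeroes)
  else (sumEven, sumOdd + x, zeroes)

theorem alt_eq_foldl (l : List Int) : sumEvenOddZeroes_alt l = l.foldl pvStep (0, 0, 0) := rfl

-- the fold from any start is A's result added componentwise to that start
theorem foldl_pvStep_eq (l : List Int) (a b c : Int) :
    l.foldl pvStep (a, b, c) =
      (a + (sumEvenOddZeroes l).1, b + (sumEvenOddZeroes l).2.1, c + (sumEvenOddZeroes l).2.2) := by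
  induction l generalizing a b c with
  | nil => simp [sumEvenOddZeroes]
  | cons x rest ih =>
    simp only [List.foldl_cons, pvStep, sumEvenOddZeroes]
    split_ifs with hx he
    · rw [ih]; ring_nf
    · rw [ih]; ring_nf
    · rw [ih]; ring_nf

-- ===== VERDICT (by name: the statement is the Claim_ definition above) =====
theorem sumEvenOddZeroes_spec : Claim_equal_sumEvenOddZeroes := by
  intro l _
  show sumEvenOddZeroes l = sumEvenOddZeroes_alt l
  rw [alt_eq_foldl, foldl_pvStep_eq]
  simp
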